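-- pv_equiv track=rewrite | github.com/f00lin/Evolution | hardy_weinberg.py | observed_gen_freqs
-- ===== SOURCE A (Python) =====
-- def observed_gen_freqs(pop):
--     one_one = 0
--     hetero = 0
--     zero_zero = 0
--     for i in pop:
--         if i[0][0] == 1:
--             if i[1][0] == 1:
--                  one_one += 1
--         if i[0][0] == 0:
--             if i[1][0] == 0:
--                 zero_zero += 1
--         if i[0][0] != i[1][0]:
--             hetero += 1
--     return [one_one, hetero, zero_zero]
-- ===== SOURCE B (Python) =====
-- def observed_gen_freqs(pop):
--     pairs = [(i[0][0], i[1][0]) for i in pop]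
--     one_one = pairs.count((1, 1))
--     zero_zero = pairs.count((0, 0))
--     hetero = sum(1 for a, b in pairs if a != b)
--     return [one_one, hetero, zero_zero]
-- ===== Notes on version B (the rewrite author's own statement) =====
-- stated objective: simpler
-- what changed: B first projects each individual to its (first-allele, first-allele) pair, then computes the three outputs by list.count on (1,1) and (0,0) and a mismatch sum, instead of A's single loop with three accumulators and nested branches.
import Mathlib
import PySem

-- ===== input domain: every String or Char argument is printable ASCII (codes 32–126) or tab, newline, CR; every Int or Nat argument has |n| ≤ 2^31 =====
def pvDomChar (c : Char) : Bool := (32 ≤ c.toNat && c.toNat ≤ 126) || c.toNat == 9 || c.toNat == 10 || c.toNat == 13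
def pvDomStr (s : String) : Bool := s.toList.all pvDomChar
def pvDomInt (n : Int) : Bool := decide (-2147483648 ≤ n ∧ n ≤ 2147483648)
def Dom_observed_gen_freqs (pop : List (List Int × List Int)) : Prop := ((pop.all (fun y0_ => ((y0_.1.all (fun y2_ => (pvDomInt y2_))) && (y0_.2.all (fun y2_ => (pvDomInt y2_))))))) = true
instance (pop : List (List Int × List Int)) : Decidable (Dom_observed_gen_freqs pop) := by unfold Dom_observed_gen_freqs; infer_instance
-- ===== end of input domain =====

-- B projects each individual to its pair of first alleles and computes the three
-- frequencies by counting over that pair list, instead of A's one loop with three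
-- accumulators and nested branches (objective: simpler).


-- ===== PORT A =====
def observed_gen_freqs (pop : List (List Int × List Int)) : List Int :=
  let s := pop.foldl (fun (st : Int × Int × Int) i =>
    let a := (PySem.List.pyGet? i.1 0).getD 0   -- i[0][0]; Pre_ rules out the IndexError (none) case
    let b := (PySem.List.pyGet? i.2 0).getD 0   -- i[1][0]
    let st1 := if a = 1 then (if b = 1 then (st.1 + 1, st.2.1, st.2.2) else st) else st
    let st2 := if a = 0 then (if b = 0 then (st1.1, st1.2.1, st1.2.2 + 1) else st1) else st1
    if a ≠ b then (st2.1, st2.2.1 + 1, st2.2.2) else st2) (0, 0, 0)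
  [s.1, s.2.1, s.2.2]

-- ===== PORT B =====
def observed_gen_freqs_alt (pop : List (List Int × List Int)) : List Int :=
  let pairs := pop.map (fun i => ((PySem.List.pyGet? i.1 0).getD 0, (PySem.List.pyGet? i.2 0).getD 0))
  let one_one : Int := PySem.List.count pairs ((1 : Int), (1 : Int))
  let zero_zero : Int := PySem.List.count pairs ((0 : Int), (0 : Int))
  let hetero : Int := pairs.foldl (fun acc p => if p.1 ≠ p.2 then acc + 1 else acc) 0
  [one_one, hetero, zero_zero]

-- ===== PRECONDITION & SPEC =====
-- Pre_ excludes exactly the inputs where Python A raises IndexError: an individual with an empty allele list.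
def Pre_observed_gen_freqs (pop : List (List Int × List Int)) : Prop :=
  ∀ i ∈ pop, i.1 ≠ [] ∧ i.2 ≠ []
instance (pop : List (List Int × List Int)) : Decidable (Pre_observed_gen_freqs pop) := by unfold Pre_observed_gen_freqs; infer_instance
def pvWitness_observed_gen_freqs : (List (List Int × List Int)) := [([1], [1]), ([0], [1]), ([0], [0])]

def Spec_observed_gen_freqs (pop : List (List Int × List Int)) (out : List Int) : Prop := out = observed_gen_freqs_alt pop
instance (pop : List (List Int × List Int)) (out : List Int) : Decidable (Spec_observed_gen_freqs pop out) := by unfold Spec_observed_gen_freqs; infer_instance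

-- ===== CLAIM (what is proved, stated in full; the proofs are below) =====
def Claim_equal_observed_gen_freqs : Prop := ∀ (pop : List (List Int × List Int)), Dom_observed_gen_freqs pop → Pre_observed_gen_freqs pop → Spec_observed_gen_freqs pop (observed_gen_freqs pop)

-- ===== LEMMAS AND PROOFS =====

lemma pvStep_eq (st : Int × Int × Int) (i : List Int × List Int) :
    (let a := (PySem.List.pyGet? i.1 0).getD 0
     let b := (PySem.List.pyGet? i.2 0).getD 0
     let st1 := if a = 1 then (if b = 1 then (st.1 + 1, st.2.1, st.2.2) else st) else st
     let st2 := if a = 0 then (if b = 0 then (st1.1, st1.2.1, st1.2.2 + 1) else st1) else st1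
     if a ≠ b then (st2.1, st2.2.1 + 1, st2.2.2) else st2)
    = (st.1 + (if (PySem.List.pyGet? i.1 0).getD 0 = 1 ∧ (PySem.List.pyGet? i.2 0).getD 0 = 1 then 1 else 0),
       st.2.1 + (if (PySem.List.pyGet? i.1 0).getD 0 ≠ (PySem.List.pyGet? i.2 0).getD 0 then 1 else 0),
       st.2.2 + (if (PySem.List.pyGet? i.1 0).getD 0 = 0 ∧ (PySem.List.pyGet? i.2 0).getD 0 = 0 then 1 else 0)) := by
  generalize (PySem.List.pyGet? i.1 0).getD 0 = a
  generalize (PySem.List.pyGet? i.2 0).getD 0 = b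
  by_cases h1 : a = 1 <;> by_cases h2 : b = 1 <;> by_cases h3 : a = 0 <;> by_cases h4 : b = 0 <;>
    by_cases h5 : a = b <;> simp_all

lemma pvHet_shift (l : List (Int × Int)) (c : Int) :
    l.foldl (fun acc p => if p.1 ≠ p.2 then acc + 1 else acc) c
      = c + l.foldl (fun acc p => if p.1 ≠ p.2 then acc + 1 else acc) 0 := by
  induction l generalizing c with
  | nil => simp
  | cons p t iht =>
    simp only [List.foldl_cons]
    rw [iht, iht (if p.1 ≠ p.2 then (0 : Int) + 1 else 0)]
    split_ifs <;> ring

lemma pvFold_eq (pop : List (List Int × List Int)) (st : Int × Int × Int) :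
    pop.foldl (fun (st : Int × Int × Int) i =>
      let a := (PySem.List.pyGet? i.1 0).getD 0
      let b := (PySem.List.pyGet? i.2 0).getD 0
      let st1 := if a = 1 then (if b = 1 then (st.1 + 1, st.2.1, st.2.2) else st) else st
      let st2 := if a = 0 then (if b = 0 then (st1.1, st1.2.1, st1.2.2 + 1) else st1) else st1
      if a ≠ b then (st2.1, st2.2.1 + 1, st2.2.2) else st2) st
    = (st.1 + (PySem.List.count (pop.map (fun i => ((PySem.List.pyGet? i.1 0).getD 0, (PySem.List.pyGet? i.2 0).getD 0))) ((1 : Int), (1 : Int)) : Int),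
       st.2.1 + (pop.map (fun i => ((PySem.List.pyGet? i.1 0).getD 0, (PySem.List.pyGet? i.2 0).getD 0))).foldl (fun acc p => if p.1 ≠ p.2 then acc + 1 else acc) 0,
       st.2.2 + (PySem.List.count (pop.map (fun i => ((PySem.List.pyGet? i.1 0).getD 0, (PySem.List.pyGet? i.2 0).getD 0))) ((0 : Int), (0 : Int)) : Int)) := by
  induction pop generalizing st with
  | nil => simp [PySem.List.count]
  | cons i rest ih =>
    rw [List.foldl_cons, ih, pvStep_eq]
    simp only [List.map_cons, List.foldl_cons, PySem.List.count_eq, List.count_cons]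
    rw [pvHet_shift _ (if ((PySem.List.pyGet? i.1 0).getD 0, (PySem.List.pyGet? i.2 0).getD 0).1
        ≠ ((PySem.List.pyGet? i.1 0).getD 0, (PySem.List.pyGet? i.2 0).getD 0).2 then (0:Int) + 1 else 0)]
    generalize (List.map (fun i => ((PySem.List.pyGet? i.1 0).getD 0, (PySem.List.pyGet? i.2 0).getD 0)) rest) = l
    generalize (PySem.List.pyGet? i.1 0).getD 0 = a
    generalize (PySem.List.pyGet? i.2 0).getD 0 = b
    simp only [beq_iff_eq, Prod.mk.injEq]
    push_cast
    refine ⟨?_, ?_, ?_⟩ <;> split_ifs <;> ring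

-- ===== VERDICT (by name: the statement is the Claim_ definition above) =====
theorem observed_gen_freqs_spec : Claim_equal_observed_gen_freqs := by
  intro pop _ _
  show observed_gen_freqs pop = observed_gen_freqs_alt pop
  simp only [observed_gen_freqs, observed_gen_freqs_alt, pvFold_eq]
  simp
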